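-- pv_equiv track=rewrite | github.com/HrithikRai/estyl_vdb_explorer | retriever_core.py | lm_fallback_plan
-- ===== SOURCE A (Python) =====
-- from typing import Any, Dict, Iterable, List, Optional, Sequence, Tuple
--
-- def lm_fallback_plan(num_outfits: int, cats: Sequence[str], text_query: str, brand_hint: str) -> List[Dict[str, str]]:
--     base = (text_query or "").strip()
--     plans = []
--     for _ in range(num_outfits):
--         plan = {}
--         for c in cats:
--             q = " ".join([w for w in [base, c, (brand_hint or "").strip()] if w])
--             plan[c] = q
--         plans.append(plan)
--     return plans
-- ===== SOURCE B (Python) =====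
-- from typing import Dict, List, Sequence, Tuple
--
--
-- def _query(base: str, c: str, hint: str) -> str:
--     # build the joined query by conditional concatenation instead of join/filter
--     q = base
--     if c:
--         q = q + " " + c if q else c
--     if hint:
--         q = q + " " + hint if q else hint
--     return q
--
--
-- def lm_fallback_plan(num_outfits: int, cats: Sequence[str], text_query: str, brand_hint: str) -> List[Dict[str, str]]:
--     base = (text_query or "").strip()
--     hint = (brand_hint or "").strip()
--     seen = set()
--     items: List[Tuple[str, str]] = []
--     for c in cats:
--         if c not in seen:
--             seen.add(c)
--             items.append((c, _query(base, c, hint)))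
--     return [dict(items) for _ in range(num_outfits)]
-- ===== Notes on version B (the rewrite author's own statement) =====
-- stated objective: alternative
-- what changed: B replaces the per-outfit dict-overwrite loop by a single dedup pass (seen-set + ordered pair list) and builds each query by conditional string concatenation instead of join over a filtered list, then materialises the dicts once from the precomputed pairs.
import Mathlib
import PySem

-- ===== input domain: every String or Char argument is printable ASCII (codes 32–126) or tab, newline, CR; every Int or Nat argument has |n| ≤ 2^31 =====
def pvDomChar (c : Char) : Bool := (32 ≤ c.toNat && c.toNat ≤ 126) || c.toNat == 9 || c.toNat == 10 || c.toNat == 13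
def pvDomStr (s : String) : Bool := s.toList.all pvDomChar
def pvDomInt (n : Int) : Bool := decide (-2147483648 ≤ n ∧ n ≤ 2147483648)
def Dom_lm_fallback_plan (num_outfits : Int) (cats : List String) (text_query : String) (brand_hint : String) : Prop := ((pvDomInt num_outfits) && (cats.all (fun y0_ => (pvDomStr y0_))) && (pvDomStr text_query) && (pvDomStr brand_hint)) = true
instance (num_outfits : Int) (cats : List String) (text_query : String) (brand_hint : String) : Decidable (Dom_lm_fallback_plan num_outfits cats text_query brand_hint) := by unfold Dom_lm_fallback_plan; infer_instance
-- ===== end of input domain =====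

-- B replaces the per-outfit dict loop by one dedup pass over cats and conditional concatenation instead of join/filter; same return value.
-- ===== PORT A =====
-- '(s or "").strip()' on a string s: for s = "" both branches give "", so it is strip s.
-- '[w for w in [...] if w]' keeps the truthy (nonempty) strings.
def pvQuery (base : String) (c : String) (hint : String) : String :=
  PySem.Str.join " " (([base, c, hint]).filter (fun w => w ≠ ""))

def lm_fallback_plan (num_outfits : Int) (cats : List String) (text_query : String) (brand_hint : String) : List (List (String × String)) :=
  let base := PySem.Str.strip text_query
  (PySem.List.pyRange 0 num_outfits 1).foldl
    (fun plans _ =>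
      plans ++ [(cats.foldl
        (fun plan c => plan.insert c (pvQuery base c (PySem.Str.strip brand_hint)))
        (PySem.Dict.empty : PySem.Dict String String)).items])
    []

-- ===== PORT B =====
-- 'q + " " + c if q else c' etc., ported as conditional concatenation (exact: Python str + is concatenation)
def pvJoinq (base : String) (c : String) (hint : String) : String :=
  let q := base
  let q := if c ≠ "" then (if q ≠ "" then q ++ " " ++ c else c) else q
  if hint ≠ "" then (if q ≠ "" then q ++ " " ++ hint else hint) else q

def lm_fallback_plan_alt (num_outfits : Int) (cats : List String) (text_query : String) (brand_hint : String) : List (List (String × String)) :=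
  let base := PySem.Str.strip text_query
  let hint := PySem.Str.strip brand_hint
  let st := cats.foldl
    (fun (st : PySem.Set String × List (String × String)) c =>
      if PySem.Set.contains st.1 c then st
      else (PySem.Set.add st.1 c, st.2 ++ [(c, pvJoinq base c hint)]))
    (PySem.Set.empty, [])
  -- dict(items) on a pair list with distinct keys IS that association list
  (PySem.List.pyRange 0 num_outfits 1).map (fun _ => st.2)

-- ===== PRECONDITION & SPEC =====
def Spec_lm_fallback_plan (num_outfits : Int) (cats : List String) (text_query : String) (brand_hint : String) (out : List (List (String × String))) : Prop := out = lm_fallback_plan_alt num_outfits cats text_query brand_hint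
instance (num_outfits : Int) (cats : List String) (text_query : String) (brand_hint : String) (out : List (List (String × String))) : Decidable (Spec_lm_fallback_plan num_outfits cats text_query brand_hint out) := by unfold Spec_lm_fallback_plan; infer_instance

-- ===== CLAIM =====
def Claim_equal_lm_fallback_plan : Prop := ∀ (num_outfits : Int) (cats : List String) (text_query : String) (brand_hint : String), Dom_lm_fallback_plan num_outfits cats text_query brand_hint → Spec_lm_fallback_plan num_outfits cats text_query brand_hint (lm_fallback_plan num_outfits cats text_query brand_hint)

-- ===== LEMMAS AND PROOFS =====

-- join over the filtered triple equals conditional concatenation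
theorem pvJoin2 (x y : String) :
    String.ofList (PySem.Chars.join [' '] [x.toList, y.toList]) = x ++ " " ++ y := by
  apply String.ext
  simp [PySem.Chars.join_cons_cons, PySem.Chars.join_singleton, String.toList_append]

theorem pvJoin3 (x y z : String) :
    String.ofList (PySem.Chars.join [' '] [x.toList, y.toList, z.toList]) = x ++ " " ++ y ++ " " ++ z := by
  apply String.ext
  simp [PySem.Chars.join_cons_cons, PySem.Chars.join_singleton, String.toList_append]

theorem pvQuery_eq_pvJoinq (base c hint : String) : pvQuery base c hint = pvJoinq base c hint := by
  unfold pvQuery pvJoinq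
  by_cases hb : base = "" <;> by_cases hc : c = "" <;> by_cases hh : hint = "" <;>
    simp [hb, hc, hh, PySem.Str.join, pvJoin2, pvJoin3]

-- getD of A's insert fold: the value stored at k depends only on k
theorem getD_fold_insert (l : List String) (f : String → String)
    (d : PySem.Dict String String) (k d0 : String) :
    (l.foldl (fun p c => p.insert c (f c)) d).getD k d0
      = if k ∈ l then f k else d.getD k d0 := by
  induction l generalizing d with
  | nil => simp
  | cons c cs ih =>
    simp only [List.foldl_cons, ih, PySem.Dict.getD_insert, List.mem_cons]
    by_cases h1 : k ∈ cs <;> by_cases h2 : k = c <;> simp [h1, h2]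

-- A's inner dict fold, as items: first occurrences of cats, each paired with f
theorem items_fold_insert (l : List String) (f : String → String) :
    ((l.foldl (fun p c => p.insert c (f c)) (PySem.Dict.empty : PySem.Dict String String)).items)
      = (PySem.Set.ofList l).map (fun k => (k, f k)) := by
  have hk : (l.foldl (fun p c => p.insert c (f c)) (PySem.Dict.empty : PySem.Dict String String)).keys
      = PySem.Set.ofList l := by
    rw [PySem.Dict.keys_foldl_insert l (fun _ c => f c)]
    rfl
  have hnd : (l.foldl (fun p c => p.insert c (f c)) (PySem.Dict.empty : PySem.Dict String String)).keys.Nodup :=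
    PySem.Dict.nodup_keys_foldl_insert l (fun _ c => f c) _ (by simp)
  rw [PySem.Dict.items_eq_map_keys _ hnd "", hk]
  apply List.map_congr_left
  intro k hkmem
  have : k ∈ l := (PySem.Set.mem_ofList ..).mp hkmem
  simp [getD_fold_insert, this]

-- the set s is a prefix of Set.update s l
theorem prefix_update (s : PySem.Set String) (l : List String) :
    s <+: PySem.Set.update s l := by
  induction l generalizing s with
  | nil => simp [PySem.Set.update]
  | cons c cs ih =>
    have h1 : s <+: PySem.Set.add s c := by
      unfold PySem.Set.add; split <;> simp
    have h2 : PySem.Set.update s (c :: cs) = PySem.Set.update (PySem.Set.add s c) cs := rfl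
    rw [h2]
    exact h1.trans (ih _)

-- B's fold: state is (Set.update s l, acc ++ the new elements paired with g)
theorem bfold (l : List String) (g : String → String)
    (s : PySem.Set String) (acc : List (String × String)) :
    (l.foldl
      (fun (st : PySem.Set String × List (String × String)) c =>
        if PySem.Set.contains st.1 c then st
        else (PySem.Set.add st.1 c, st.2 ++ [(c, g c)]))
      (s, acc))
    = (PySem.Set.update s l,
       acc ++ ((PySem.Set.update s l).drop s.length).map (fun k => (k, g k))) := by
  induction l generalizing s acc with
  | nil => simp [PySem.Set.update]
  | cons c cs ih =>
    rw [List.foldl_cons]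
    by_cases h : PySem.Set.contains s c = true
    · have hm : c ∈ s := (PySem.Set.contains_iff s c).mp h
      have hadd : PySem.Set.add s c = s := by simp [PySem.Set.add, hm]
      have hupd : PySem.Set.update s (c :: cs) = PySem.Set.update s cs := by
        show PySem.Set.update (PySem.Set.add s c) cs = _
        rw [hadd]
      rw [show ((s, acc) : PySem.Set String × List (String × String)).1.contains c = true from h,
        if_pos rfl, hupd]
      exact ih s acc
    · have hm : c ∉ s := fun hmem => h ((PySem.Set.contains_iff s c).mpr hmem)
      have hadd : PySem.Set.add s c = s ++ [c] := by simp [PySem.Set.add, hm]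
      have hupd : PySem.Set.update s (c :: cs) = PySem.Set.update (s ++ [c]) cs := by
        show PySem.Set.update (PySem.Set.add s c) cs = _
        rw [hadd]
      rw [if_neg (show ¬(((s, acc) : PySem.Set String × List (String × String)).1.contains c = true) from h)]
      rw [show (((s, acc) : PySem.Set String × List (String × String)).1.add c,
            ((s, acc) : PySem.Set String × List (String × String)).2 ++ [(c, g c)])
            = ((s ++ [c] : PySem.Set String), acc ++ [(c, g c)]) from by simp [hadd]]
      rw [ih (s ++ [c]) (acc ++ [(c, g c)]), hupd]
      obtain ⟨t, ht⟩ := prefix_update (s ++ [c]) cs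
      rw [← ht]
      simp

-- Set.update s l with s prefix: drop s.length yields exactly the appended new part — handled inline above

theorem foldl_append_const {α β : Type} (l : List α) (p : β) (acc : List β) :
    l.foldl (fun plans _ => plans ++ [p]) acc = acc ++ List.replicate l.length p := by
  induction l generalizing acc with
  | nil => simp
  | cons x xs ih => simp [List.foldl, ih, List.replicate_succ]

-- ===== VERDICT =====
theorem lm_fallback_plan_spec : Claim_equal_lm_fallback_plan := by
  intro n cats tq bh _
  unfold Spec_lm_fallback_plan lm_fallback_plan lm_fallback_plan_alt
  dsimp only
  rw [foldl_append_const, bfold, items_fold_insert]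
  rw [show PySem.Set.update (PySem.Set.empty : PySem.Set String) cats = PySem.Set.ofList cats from rfl]
  simp only [List.map_const', List.nil_append, PySem.Set.empty, List.length_nil, List.drop_zero]
  exact congrArg _ (List.map_congr_left fun c _ => by rw [pvQuery_eq_pvJoinq])
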